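-- pv_equiv track=rewrite | github.com/isxinli/trans-sci | src/utils.py | get_dui_subtree
-- ===== SOURCE A (Python) =====
-- def get_dui_subtree(dui2dtn, target_dtn):
--     """Return subtrees of given descriptor tree numbers"""
--     results = set()
--     for dui, dtn in dui2dtn.items():
--         if dtn is not None:
--             for tn in dtn:
--                 if any(tn.startswith(elem) for elem in target_dtn):
--                     results.add(dui)
--                     break
--     return results
-- ===== SOURCE B (Python) =====
-- def get_dui_subtree(dui2dtn, target_dtn):
--     """Return subtrees of given descriptor tree numbers"""
--     targets = set(target_dtn)
--     return {dui
--             for dui, dtn in dui2dtn.items()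
--             if dtn is not None
--             and any(tn[:i] in targets
--                     for tn in dtn
--                     for i in range(len(tn) + 1))}
-- ===== Notes on version B (the rewrite author's own statement) =====
-- stated objective: alternative
-- what changed: Instead of scanning every target prefix for every tree number, B puts the targets in a set once and tests each tree number's own prefixes for membership, so the inner scan over target_dtn disappears (trades O(P) prefix scans for O(L) set lookups per tree number).
import Mathlib
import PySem

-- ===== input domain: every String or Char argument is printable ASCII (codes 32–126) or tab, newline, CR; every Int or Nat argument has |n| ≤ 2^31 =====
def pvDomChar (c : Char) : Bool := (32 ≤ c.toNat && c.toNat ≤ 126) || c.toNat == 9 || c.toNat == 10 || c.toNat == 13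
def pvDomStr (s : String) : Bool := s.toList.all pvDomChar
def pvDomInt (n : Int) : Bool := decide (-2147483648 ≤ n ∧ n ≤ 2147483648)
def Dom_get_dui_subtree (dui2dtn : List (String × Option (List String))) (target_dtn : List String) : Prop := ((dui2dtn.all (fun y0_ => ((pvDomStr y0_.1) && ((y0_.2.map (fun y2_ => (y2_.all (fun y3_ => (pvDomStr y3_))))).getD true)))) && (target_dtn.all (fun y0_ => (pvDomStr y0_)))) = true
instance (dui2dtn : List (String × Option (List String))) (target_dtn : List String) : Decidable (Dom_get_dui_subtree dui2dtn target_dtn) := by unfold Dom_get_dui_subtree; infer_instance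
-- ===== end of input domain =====

-- B replaces A's inner scan over all target prefixes by one hash set of targets and a
-- membership test on each tree number's own prefixes (objective: alternative algorithm, same result).


-- ===== PORT A =====
-- inner 'for tn in dtn: if any(tn.startswith(elem) for elem in target_dtn): results.add(dui); break'
def pvScanA (target_dtn : List String) : List String → Bool
  | [] => false
  | tn :: rest =>
      if target_dtn.any (fun elem => PySem.Str.startswith tn elem) then true
      else pvScanA target_dtn rest

def get_dui_subtree (dui2dtn : List (String × Option (List String))) (target_dtn : List String) : List String :=
  (PySem.Dict.ofList dui2dtn).items.foldl
    (fun results p =>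
      match p.2 with
      | none => results
      | some dtn => if pvScanA target_dtn dtn then PySem.Set.add results p.1 else results)
    PySem.Set.empty

-- ===== PORT B =====
-- any(tn[:i] in targets for tn in dtn for i in range(len(tn) + 1))
def pvHitB (targets : PySem.Set String) (dtn : List String) : Bool :=
  dtn.any (fun tn =>
    (PySem.List.pyRange 0 (PySem.Str.len tn + 1) 1).any
      (fun i => PySem.Set.contains targets (PySem.Str.slice tn none (some i))))

def get_dui_subtree_alt (dui2dtn : List (String × Option (List String))) (target_dtn : List String) : List String :=
  let targets := PySem.Set.ofList target_dtn
  (PySem.Dict.ofList dui2dtn).items.foldl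
    (fun res p =>
      if (match p.2 with
          | none => false
          | some dtn => pvHitB targets dtn)
      then PySem.Set.add res p.1 else res)
    PySem.Set.empty

-- ===== PRECONDITION & SPEC =====
def Spec_get_dui_subtree (dui2dtn : List (String × Option (List String))) (target_dtn : List String) (out : List String) : Prop := out = get_dui_subtree_alt dui2dtn target_dtn
instance (dui2dtn : List (String × Option (List String))) (target_dtn : List String) (out : List String) : Decidable (Spec_get_dui_subtree dui2dtn target_dtn out) := by unfold Spec_get_dui_subtree; infer_instance

-- ===== CLAIM (what is proved, stated in full; the proofs are below) =====
def Claim_equal_get_dui_subtree : Prop := ∀ (dui2dtn : List (String × Option (List String))) (target_dtn : List String), Dom_get_dui_subtree dui2dtn target_dtn → Spec_get_dui_subtree dui2dtn target_dtn (get_dui_subtree dui2dtn target_dtn)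

-- ===== LEMMAS AND PROOFS =====

-- 'some elem of target_dtn is a prefix of tn'  =  'some prefix tn[:i] of tn is in set(target_dtn)'
theorem pvStartswith_eq_prefixHit (target_dtn : List String) (tn : String) :
    target_dtn.any (fun elem => PySem.Str.startswith tn elem)
      = (PySem.List.pyRange 0 (PySem.Str.len tn + 1) 1).any
          (fun i => PySem.Set.contains (PySem.Set.ofList target_dtn) (PySem.Str.slice tn none (some i))) := by
  rw [Bool.eq_iff_iff]
  simp only [List.any_eq_true, PySem.Str.startswith_eq,
    PySem.Chars.startswith_iff, PySem.List.mem_pyRange_one,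
    PySem.Set.contains_iff, PySem.Set.mem_ofList]
  constructor
  · rintro ⟨e, he, hpre⟩
    refine ⟨(e.toList.length : Int), ⟨by positivity, ?_⟩, ?_⟩
    · have := hpre.length_le
      simp only [PySem.Str.len_eq]
      omega
    · have : PySem.Str.slice tn none (some (e.toList.length : Int)) = e := by
        apply String.ext
        rw [PySem.Str.toList_slice, PySem.Chars.slice_eq_listSlice,
          PySem.List.slice_to_natCast]
        exact (List.prefix_iff_eq_take.mp hpre).symm
      rwa [this]
  · rintro ⟨i, ⟨h0, _⟩, hmem⟩
    refine ⟨PySem.Str.slice tn none (some i), hmem, ?_⟩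
    rw [PySem.Str.toList_slice, PySem.Chars.slice_eq_listSlice, PySem.List.slice_to _ h0]
    exact List.take_prefix _ _

theorem pvScanA_eq_hitB (target_dtn : List String) (dtn : List String) :
    pvScanA target_dtn dtn = pvHitB (PySem.Set.ofList target_dtn) dtn := by
  induction dtn with
  | nil => rfl
  | cons tn rest ih =>
      simp only [pvScanA, pvHitB, List.any_cons, pvStartswith_eq_prefixHit]
      rw [← pvHitB]
      cases h : (PySem.List.pyRange 0 (PySem.Str.len tn + 1) 1).any
          (fun i => PySem.Set.contains (PySem.Set.ofList target_dtn) (PySem.Str.slice tn none (some i))) with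
      | true => simp
      | false => simp [ih, pvHitB]

-- ===== VERDICT (by name: the statement is the Claim_ definition above) =====
theorem get_dui_subtree_spec : Claim_equal_get_dui_subtree := by
  intro dui2dtn target_dtn _
  unfold Spec_get_dui_subtree get_dui_subtree get_dui_subtree_alt
  apply PySem.List.foldl_congr_mem
  intro res p _
  cases p.2 with
  | none => simp
  | some dtn => simp [pvScanA_eq_hitB]
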